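-- pv_equiv track=rewrite | github.com/naveen5563/DSA0301-NLP | Day 1/2_finite state automaton that recognizes a specific language or pattern.py | ends_with_ab
-- ===== SOURCE A (Python) =====
-- def ends_with_ab(input_string):
--     # Define the states of the automaton
--     states = {
--         0: {'a': 1, 'b': 0},
--         1: {'a': 1, 'b': 2},
--         2: {'a': 1, 'b': 0}
--     }
--
--     # Start in the initial state
--     current_state = 0
--
--     # Iterate through the characters in the input string
--     for char in input_string:
--         if char not in states[current_state]:
--             return False
--         current_state = states[current_state][char]
--
--     # Check if the final state is reached (ending with 'ab')
--     return current_state == 2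
-- ===== SOURCE B (Python) =====
-- def ends_with_ab(input_string):
--     return all(c in 'ab' for c in input_string) and input_string.endswith('ab')
-- ===== Notes on version B (the rewrite author's own statement) =====
-- stated objective: simpler
-- what changed: Replaces the explicit DFA (state variable plus transition table) by a direct predicate: one membership scan over the characters conjoined with a built-in suffix check.
import Mathlib
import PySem

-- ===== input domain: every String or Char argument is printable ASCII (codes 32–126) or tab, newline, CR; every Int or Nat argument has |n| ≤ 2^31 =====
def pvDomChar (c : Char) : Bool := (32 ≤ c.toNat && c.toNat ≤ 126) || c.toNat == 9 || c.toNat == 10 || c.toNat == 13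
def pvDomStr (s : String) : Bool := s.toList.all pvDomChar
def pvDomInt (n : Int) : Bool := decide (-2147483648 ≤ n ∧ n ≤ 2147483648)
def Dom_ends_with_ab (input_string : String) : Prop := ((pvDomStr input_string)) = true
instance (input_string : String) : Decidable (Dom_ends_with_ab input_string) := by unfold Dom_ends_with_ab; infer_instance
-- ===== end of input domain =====

-- B replaces A's explicit DFA (state variable + transition table) by a direct predicate:
-- all characters in {'a','b'} AND the string ends with "ab".

-- ===== PORT A =====
-- the transition table states[current_state][char]; none = the 'char not in states[...]' early return False
def ewStep (s : Int) (c : Char) : Option Int :=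
  if s = 0 then (if c = 'a' then some 1 else if c = 'b' then some 0 else none)
  else if s = 1 then (if c = 'a' then some 1 else if c = 'b' then some 2 else none)
  else (if c = 'a' then some 1 else if c = 'b' then some 0 else none)

-- the for-loop over the characters; Option carries the early 'return False'
def ends_with_ab (input_string : String) : Bool :=
  match input_string.toList.foldl (fun os c => os.bind (fun s => ewStep s c)) (some 0) with
  | some st => st == 2
  | none => false

-- ===== PORT B =====
def ends_with_ab_alt (input_string : String) : Bool :=
  (input_string.toList.all (fun c => "ab".toList.contains c))
    && PySem.Str.endswith input_string "ab"

-- ===== PRECONDITION & SPEC =====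
def Spec_ends_with_ab (input_string : String) (out : Bool) : Prop := out = ends_with_ab_alt input_string
instance (input_string : String) (out : Bool) : Decidable (Spec_ends_with_ab input_string out) := by unfold Spec_ends_with_ab; infer_instance

-- ===== CLAIM (what is proved, stated in full; the proofs are below) =====
def Claim_equal_ends_with_ab : Prop := ∀ (input_string : String), Dom_ends_with_ab input_string → Spec_ends_with_ab input_string (ends_with_ab input_string)

-- ===== LEMMAS AND PROOFS =====

-- classification of the DFA state by the REVERSED processed prefix (1 = ends in 'a', 2 = ends in "ab", 0 = otherwise)
def clsRev : List Char → Int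
  | [] => 0
  | c :: r =>
    if c = 'a' then 1
    else if c = 'b' then (match r with | c2 :: _ => if c2 = 'a' then 2 else 0 | [] => 0)
    else 0

def ewOk (c : Char) : Bool := "ab".toList.contains c

lemma ewRun_eq (l : List Char) :
    l.foldl (fun os c => os.bind (fun s => ewStep s c)) (some 0)
      = if l.all ewOk then some (clsRev l.reverse) else none := by
  induction l using List.reverseRecOn with
  | nil => simp [clsRev]
  | append_singleton l c ih =>
    rw [List.foldl_append, ih]
    by_cases hall : l.all ewOk = true
    · simp only [hall, if_pos, List.foldl, Option.bind_some, List.all_append, List.all_cons,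
        List.all_nil, Bool.and_true, List.reverse_append, List.reverse_singleton,
        List.singleton_append]
      by_cases ha : c = 'a'
      · subst ha
        have : ewOk 'a' = true := by decide
        simp [this, ewStep, clsRev]
      · by_cases hb : c = 'b'
        · subst hb
          have : ewOk 'b' = true := by decide
          simp only [this, Bool.true_and, if_pos]
          cases hr : l.reverse with
          | nil => simp [clsRev, ewStep]
          | cons c2 t =>
            by_cases h2a : c2 = 'a'
            · subst h2a; simp [clsRev, ewStep, ha]
            · by_cases h2b : c2 = 'b'
              · subst h2b
                have h02 : clsRev ('b' :: t) = 0 ∨ clsRev ('b' :: t) = 2 := by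
                  simp only [clsRev]
                  cases t with
                  | nil => simp
                  | cons c3 t3 => by_cases h3 : c3 = 'a' <;> simp [h3]
                have hrhs : clsRev ('b' :: 'b' :: t) = (0 : Int) := by simp [clsRev]
                rw [hrhs]
                rcases h02 with h | h <;> rw [h] <;> decide
              · simp [clsRev, ewStep, ha, h2a, h2b]
        · have hok : ewOk c = false := by
            have hab : "ab".toList = ['a', 'b'] := rfl
            unfold ewOk
            rw [hab]
            simp [ha, hb]
          simp [hok, ewStep, ha, hb]
    · simp [hall, List.all_append]

lemma clsRev_eq_two_iff (r : List Char) : clsRev r = 2 ↔ ∃ t, r = 'b' :: 'a' :: t := by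
  cases r with
  | nil => simp [clsRev]
  | cons c r =>
    cases r with
    | nil =>
      simp only [clsRev]
      split_ifs <;> simp_all
    | cons c2 t =>
      simp only [clsRev]
      split_ifs with h1 h2 h3 <;> simp_all

lemma endswith_ab_eq (l : List Char) :
    PySem.Chars.endswith l ['a', 'b'] = decide (clsRev l.reverse = 2) := by
  by_cases h : PySem.Chars.endswith l ['a', 'b'] = true
  · rw [h]
    have hsuf : ['a', 'b'] <:+ l := (PySem.Chars.endswith_iff _ _).mp h
    obtain ⟨t, ht⟩ := hsuf
    subst ht
    have : (t ++ ['a', 'b']).reverse = 'b' :: 'a' :: t.reverse := by simp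
    rw [eq_comm, decide_eq_true_iff, clsRev_eq_two_iff]
    exact ⟨t.reverse, this⟩
  · rw [Bool.not_eq_true] at h
    rw [h, eq_comm, decide_eq_false_iff_not, clsRev_eq_two_iff]
    rintro ⟨t, ht⟩
    have hl : l = ('b' :: 'a' :: t).reverse := by
      rw [← ht, List.reverse_reverse]
    have hsuf : ['a', 'b'] <:+ l := by
      rw [hl]
      exact ⟨t.reverse, by simp⟩
    rw [← Bool.not_eq_true] at h
    exact h ((PySem.Chars.endswith_iff _ _).mpr hsuf)

-- ===== VERDICT (by name: the statement is the Claim_ definition above) =====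
theorem ends_with_ab_spec : Claim_equal_ends_with_ab := by
  intro s _
  show ends_with_ab s = ends_with_ab_alt s
  unfold ends_with_ab ends_with_ab_alt
  rw [ewRun_eq]
  by_cases hall : s.toList.all ewOk = true
  · have hall' : s.toList.all (fun c => "ab".toList.contains c) = true := hall
    rw [if_pos hall, hall', Bool.true_and, PySem.Str.endswith_eq]
    have : "ab".toList = ['a', 'b'] := rfl
    rw [this, endswith_ab_eq]
    by_cases h : clsRev s.toList.reverse = 2 <;> simp [h]
  · have hall' : s.toList.all (fun c => "ab".toList.contains c) = false := by
      rw [← Bool.not_eq_true]; exact hall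
    rw [if_neg hall, hall', Bool.false_and]
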